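-- pv_equiv track=rewrite | github.com/SiliconForge/RSApy | converttext.py | inttotext
-- ===== SOURCE A (Python) =====
-- def inttotext(inteiro):
-- 	linha = ""
-- 	binario = bin(inteiro)[2:]
-- #	print binario
-- 	for i in range (0,len(binario),7):
-- 		bina = binario[i:i+6]
-- #		print bina
-- 		caractere = chr(int(binario[i:i+7],2))
-- #		print caractere
-- 		linha = linha + caractere
-- 	return linha
-- ===== SOURCE B (Python) =====
-- def inttotext(inteiro):
--     out = []
--     value = 0
--     count = 0
--     for ch in bin(inteiro)[2:]:
--         value = value * 2 + int(ch)
--         count += 1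
--         if count == 7:
--             out.append(chr(value))
--             value = 0
--             count = 0
--     if count > 0:
--         out.append(chr(value))
--     return "".join(out)
-- ===== Notes on version B (the rewrite author's own statement) =====
-- stated objective: alternative
-- what changed: Replaces the stride-7 index loop with repeated slicing and per-chunk int(.,2) parsing by a single streaming pass over the bits that maintains a value/count accumulator, emitting a character each time 7 bits have been absorbed and flushing the final partial group.
import Mathlib
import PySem

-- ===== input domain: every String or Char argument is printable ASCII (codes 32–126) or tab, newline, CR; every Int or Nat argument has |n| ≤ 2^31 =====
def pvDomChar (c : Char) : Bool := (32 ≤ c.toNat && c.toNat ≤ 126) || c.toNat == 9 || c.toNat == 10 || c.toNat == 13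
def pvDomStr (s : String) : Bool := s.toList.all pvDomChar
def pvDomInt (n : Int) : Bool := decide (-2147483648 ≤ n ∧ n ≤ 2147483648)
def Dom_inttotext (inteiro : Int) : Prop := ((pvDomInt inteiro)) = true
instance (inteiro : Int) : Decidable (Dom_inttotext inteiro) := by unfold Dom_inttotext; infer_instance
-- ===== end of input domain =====

-- B replaces A's stride-7 slice-and-parse loop by a one-pass streaming bit accumulator (alternative decomposition, same cost).

-- ===== PORT A =====
-- bin(n)[2:] for n ≥ 0 (MSB first); exact transliteration of Python's bin on the nonnegative ints Pre_ admits
def pvBin (n : Nat) : List Char :=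
  if h : n < 2 then [Char.ofNat (48 + n)]
  else pvBin (n / 2) ++ [Char.ofNat (48 + n % 2)]
decreasing_by exact Nat.div_lt_self (by omega) (by omega)

def inttotext (inteiro : Int) : String :=
  let binario := pvBin inteiro.toNat
  let linha := (PySem.List.pyRange 0 (binario.length : Int) 7).foldl
    (fun linha i =>
      -- int(binario[i:i+7], 2): hand-ported as a base-2 digit fold, exact for '0'/'1' strings
      linha ++ [Char.ofNat ((PySem.List.slice binario (some i) (some (i + 7))).foldl
        (fun a ch => a * 2 + (ch.toNat - 48)) 0)])
    ([] : List Char)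
  String.mk linha

-- ===== PORT B =====
def inttotext_alt (inteiro : Int) : String :=
  let st := (pvBin inteiro.toNat).foldl
    (fun (st : List Char × Nat × Nat) ch =>
      let value := st.2.1 * 2 + (ch.toNat - 48)  -- int(ch), exact for digit chars
      let count := st.2.2 + 1
      if count = 7 then (st.1 ++ [Char.ofNat value], 0, 0) else (st.1, value, count))
    (([] : List Char), 0, 0)
  String.mk (if st.2.2 > 0 then st.1 ++ [Char.ofNat st.2.1] else st.1)

-- ===== PRECONDITION & SPEC =====
-- Pre_ excludes negative inputs: there bin(inteiro)[2:] starts with 'b' and int(.,2) raises ValueError in A (and int(ch) in B).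
def Pre_inttotext (inteiro : Int) : Prop := 0 ≤ inteiro
instance (inteiro : Int) : Decidable (Pre_inttotext inteiro) := by unfold Pre_inttotext; infer_instance
def pvWitness_inttotext : Int := (65)

def Spec_inttotext (inteiro : Int) (out : String) : Prop := out = inttotext_alt inteiro
instance (inteiro : Int) (out : String) : Decidable (Spec_inttotext inteiro out) := by unfold Spec_inttotext; infer_instance

-- ===== CLAIM (what is proved, stated in full; the proofs are below) =====
def Claim_equal_inttotext : Prop := ∀ (inteiro : Int), Dom_inttotext inteiro → Pre_inttotext inteiro → Spec_inttotext inteiro (inttotext inteiro)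

-- ===== LEMMAS AND PROOFS =====

-- shared reference shape: the list of characters, one per 7-bit chunk
def pvParse (t : List Char) : Nat := t.foldl (fun a ch => a * 2 + (ch.toNat - 48)) 0

def pvChunks (s : List Char) : List Char :=
  if h : s = [] then []
  else Char.ofNat (pvParse (s.take 7)) :: pvChunks (s.drop 7)
termination_by s.length
decreasing_by
  have := List.length_pos_iff.mpr h
  simp only [List.length_drop]
  omega

theorem pvChunks_nil : pvChunks [] = [] := by unfold pvChunks; simp

theorem pvChunks_cons {s : List Char} (h : s ≠ []) :
    pvChunks s = Char.ofNat (pvParse (s.take 7)) :: pvChunks (s.drop 7) := by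
  conv_lhs => rw [pvChunks]
  simp [h]

-- A-side: the stride-7 range fold computes pvChunks
theorem pvFoldA (s acc : List Char) :
    (List.range ((s.length + 6) / 7)).foldl
      (fun l k => l ++ [Char.ofNat (((s.drop (7 * k)).take 7).foldl
        (fun a ch => a * 2 + (ch.toNat - 48)) 0)]) acc
    = acc ++ pvChunks s := by
  by_cases h : s = []
  · subst h; simp [pvChunks_nil]
  · have hlen : 0 < s.length := List.length_pos_iff.mpr h
    have hcnt : (s.length + 6) / 7 = ((s.drop 7).length + 6) / 7 + 1 := by
      simp only [List.length_drop]; omega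
    rw [hcnt, List.range_succ_eq_map, List.foldl_cons, List.foldl_map]
    have harg : ∀ k : ℕ, (s.drop (7 * (k + 1))).take 7 = ((s.drop 7).drop (7 * k)).take 7 := by
      intro k; rw [List.drop_drop]; ring_nf
    simp only [harg, Nat.mul_zero, List.drop_zero]
    rw [pvFoldA (s.drop 7)]
    rw [pvChunks_cons h]
    simp [pvParse]
termination_by s.length
decreasing_by simp only [List.length_drop]; omega

def pvStep (st : List Char × Nat × Nat) (ch : Char) : List Char × Nat × Nat :=
  if st.2.2 + 1 = 7 then (st.1 ++ [Char.ofNat (st.2.1 * 2 + (ch.toNat - 48))], 0, 0)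
  else (st.1, st.2.1 * 2 + (ch.toNat - 48), st.2.2 + 1)

-- absorbing a block that completes a chunk
theorem pvStepFull (t : List Char) (acc : List Char) (v c : Nat)
    (h : c + t.length = 7) (hne : t ≠ []) :
    t.foldl pvStep (acc, v, c)
    = (acc ++ [Char.ofNat (t.foldl (fun a ch => a * 2 + (ch.toNat - 48)) v)], 0, 0) := by
  induction t generalizing v c with
  | nil => exact absurd rfl hne
  | cons ch t ih =>
    rw [List.foldl_cons]
    by_cases h7 : c + 1 = 7
    · have ht : t = [] := by
        cases t with
        | nil => rfl
        | cons a b => simp only [List.length_cons] at h; omega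
      subst ht
      simp [pvStep, h7]
    · have htne : t ≠ [] := by
        intro he; subst he; simp only [List.length_cons, List.length_nil] at h; omega
      rw [show pvStep (acc, v, c) ch = (acc, v * 2 + (ch.toNat - 48), c + 1) by
        unfold pvStep; rw [if_neg h7]]
      rw [ih (v * 2 + (ch.toNat - 48)) (c + 1)
        (by simp only [List.length_cons] at h; omega) htne]
      rw [List.foldl_cons]

-- absorbing a block that stays partial
theorem pvStepPartial (t : List Char) (acc : List Char) (v c : Nat) (h : c + t.length < 7) :
    t.foldl pvStep (acc, v, c)
    = (acc, t.foldl (fun a ch => a * 2 + (ch.toNat - 48)) v, c + t.length) := by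
  induction t generalizing v c with
  | nil => simp
  | cons ch t ih =>
    have h7 : ¬ c + 1 = 7 := by simp only [List.length_cons] at h; omega
    rw [List.foldl_cons,
      show pvStep (acc, v, c) ch = (acc, v * 2 + (ch.toNat - 48), c + 1) by
        unfold pvStep; rw [if_neg h7],
      ih (v * 2 + (ch.toNat - 48)) (c + 1) (by simp only [List.length_cons] at h; omega),
      List.foldl_cons, List.length_cons,
      show c + 1 + t.length = c + (t.length + 1) by omega]

-- B-side: the streaming fold plus final flush computes pvChunks
theorem pvStream (s acc : List Char) :
    (if (s.foldl pvStep (acc, 0, 0)).2.2 > 0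
      then (s.foldl pvStep (acc, 0, 0)).1 ++ [Char.ofNat (s.foldl pvStep (acc, 0, 0)).2.1]
      else (s.foldl pvStep (acc, 0, 0)).1) = acc ++ pvChunks s := by
  by_cases h : s = []
  · subst h; simp [pvChunks_nil]
  · by_cases hlen : s.length < 7
    · rw [pvStepPartial s acc 0 0 (by omega)]
      have hpos : 0 < s.length := List.length_pos_iff.mpr h
      have ht : s.take 7 = s := List.take_of_length_le (by omega)
      have hd : s.drop 7 = [] := List.drop_eq_nil_of_le (by omega)
      simp only [Nat.zero_add]
      rw [if_pos hpos, pvChunks_cons h, ht, hd, pvChunks_nil]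
      simp [pvParse]
    · have h7 : (s.take 7).length = 7 := by simp only [List.length_take]; omega
      have hfst : (s.take 7).foldl pvStep (acc, 0, 0)
          = (acc ++ [Char.ofNat ((s.take 7).foldl (fun a ch => a * 2 + (ch.toNat - 48)) 0)], 0, 0) :=
        pvStepFull (s.take 7) acc 0 0 (by omega)
          (by intro he; rw [he] at h7; simp at h7)
      have hsplit : s.foldl pvStep (acc, 0, 0)
          = (s.drop 7).foldl pvStep
              (acc ++ [Char.ofNat ((s.take 7).foldl (fun a ch => a * 2 + (ch.toNat - 48)) 0)], 0, 0) := by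
        conv_lhs => rw [(List.take_append_drop 7 s).symm]
        rw [List.foldl_append, hfst]
      rw [hsplit, pvStream (s.drop 7), pvChunks_cons h]
      simp [pvParse]
termination_by s.length
decreasing_by simp only [List.length_drop]; omega

-- the pyRange count for step 7 is the ceiling (L+6)/7
theorem pvCnt (L : ℕ) :
    (if (0 : ℤ) < (L : ℤ) then (((L : ℤ) + 7 - 1) / 7).toNat else 0) = (L + 6) / 7 := by
  rcases Nat.eq_zero_or_pos L with h | h
  · subst h; simp
  · rw [if_pos (by exact_mod_cast h)]
    omega

theorem pvA_eq_chunks (n : ℕ) : inttotext (n : Int) = String.mk (pvChunks (pvBin n)) := by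
  unfold inttotext
  simp only []
  rw [PySem.List.pyRange_of_pos 0 ((pvBin (Int.toNat (n : Int))).length : Int) (by norm_num)]
  simp only [Int.sub_zero]
  rw [pvCnt, List.foldl_map]
  have harg : ∀ k : ℕ, PySem.List.slice (pvBin (Int.toNat (n : Int))) (some (0 + 7 * (k : ℤ)))
      (some (0 + 7 * (k : ℤ) + 7)) = ((pvBin (Int.toNat (n : Int))).drop (7 * k)).take 7 := by
    intro k
    rw [show (0 + 7 * (k : ℤ)) = ((7 * k : ℕ) : ℤ) by push_cast; ring,
        show (((7 * k : ℕ) : ℤ) + 7) = ((7 * k : ℕ) : ℤ) + ((7 : ℕ) : ℤ) by norm_num,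
        PySem.List.slice_natCast_add]
  simp only [harg]
  rw [pvFoldA]
  simp

theorem pvB_eq_chunks (n : ℕ) : inttotext_alt (n : Int) = String.mk (pvChunks (pvBin n)) := by
  unfold inttotext_alt
  simp only []
  rw [show (fun (st : List Char × Nat × Nat) ch =>
      if st.2.2 + 1 = 7 then (st.1 ++ [Char.ofNat (st.2.1 * 2 + (ch.toNat - 48))], 0, 0)
      else (st.1, st.2.1 * 2 + (ch.toNat - 48), st.2.2 + 1)) = pvStep by
    funext st ch; unfold pvStep; rfl]
  rw [pvStream (pvBin (Int.toNat (n : Int))) []]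
  simp

-- ===== VERDICT (by name: the statement is the Claim_ definition above) =====
theorem inttotext_spec : Claim_equal_inttotext := by
  intro inteiro _ hpre
  unfold Spec_inttotext
  obtain ⟨n, rfl⟩ := Int.eq_ofNat_of_zero_le hpre
  rw [pvA_eq_chunks, pvB_eq_chunks]
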